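-- pv_equiv track=rewrite | github.com/Atipico1/bert | preprocess_dataset.py | detect_long_unbroken_string
-- ===== SOURCE A (Python) =====
-- def detect_long_unbroken_string(s, threshold=30):
--     max_unbroken_length = 0
--     current_length = 0
--     for char in s:
--         if char != ' ':
--             current_length += 1
--             if current_length > max_unbroken_length:
--                 max_unbroken_length = current_length
--         else:
--             current_length = 0
--
--         if max_unbroken_length >= threshold:
--             return True
--
--     return False
-- ===== SOURCE B (Python) =====
-- def detect_long_unbroken_string(s, threshold=30):
--     if not s:
--         return False
--     lens = [len(p) for p in s.split(' ')]
--     return max(lens) >= threshold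
-- ===== Notes on version B (the rewrite author's own statement) =====
-- stated objective: idiomatic
-- what changed: Replaces the streaming char-by-char run counter with early return by tokenizing the string on the single space character and comparing the longest token's length to the threshold, with an explicit empty-string guard.
import Mathlib
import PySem

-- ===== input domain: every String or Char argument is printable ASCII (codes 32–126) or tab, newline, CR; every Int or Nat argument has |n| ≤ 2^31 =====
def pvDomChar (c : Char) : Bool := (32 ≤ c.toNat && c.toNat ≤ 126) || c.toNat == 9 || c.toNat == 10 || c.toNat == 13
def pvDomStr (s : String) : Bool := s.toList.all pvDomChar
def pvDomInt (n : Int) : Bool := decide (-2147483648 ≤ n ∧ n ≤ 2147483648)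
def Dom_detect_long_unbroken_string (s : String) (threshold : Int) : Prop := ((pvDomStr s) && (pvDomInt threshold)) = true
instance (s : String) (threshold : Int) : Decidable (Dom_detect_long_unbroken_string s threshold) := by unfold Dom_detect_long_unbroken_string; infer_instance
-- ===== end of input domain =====

-- B splits the string on the single space character and compares the longest token's length to the threshold,
-- instead of A's streaming char-by-char run counter with early return (objective: idiomatic).

-- ===== PORT A =====
-- the for-loop with its early 'return True': state (max_unbroken_length, current_length)
def detectLoopA (threshold : Int) : List Char → Int → Int → Bool
  | [], _, _ => false
  | c :: rest, maxLen, curLen =>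
    let p : Int × Int :=
      if c ≠ ' ' then
        let cl := curLen + 1
        if cl > maxLen then (cl, cl) else (maxLen, cl)
      else (maxLen, 0)
    if p.1 ≥ threshold then true else detectLoopA threshold rest p.1 p.2

def detect_long_unbroken_string (s : String) (threshold : Int) : Bool :=
  detectLoopA threshold s.toList 0 0

-- ===== PORT B =====
def detect_long_unbroken_string_alt (s : String) (threshold : Int) : Bool :=
  if s.toList.isEmpty then false
  else
    let lens : List Int := (PySem.Chars.splitOn s.toList [' ']).map (fun p => (p.length : Int))
    match PySem.List.max? lens (fun x => x) with
    | some m => decide (m ≥ threshold)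
    | none => false   -- unreachable: split(' ') of a nonempty string yields at least one token

-- ===== PRECONDITION & SPEC =====
def Spec_detect_long_unbroken_string (s : String) (threshold : Int) (out : Bool) : Prop := out = detect_long_unbroken_string_alt s threshold
instance (s : String) (threshold : Int) (out : Bool) : Decidable (Spec_detect_long_unbroken_string s threshold out) := by unfold Spec_detect_long_unbroken_string; infer_instance

-- ===== CLAIM (what is proved, stated in full; the proofs are below) =====
def Claim_equal_detect_long_unbroken_string : Prop := ∀ (s : String) (threshold : Int), Dom_detect_long_unbroken_string s threshold → Spec_detect_long_unbroken_string s threshold (detect_long_unbroken_string s threshold)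

-- ===== LEMMAS AND PROOFS =====

-- the no-early-return version of A's loop: final max_unbroken_length
def fmA : List Char → Int → Int → Int
  | [], maxLen, _ => maxLen
  | c :: rest, maxLen, curLen =>
    if c ≠ ' ' then fmA rest (max maxLen (curLen + 1)) (curLen + 1)
    else fmA rest maxLen 0

-- reference tokenizer: maximal runs between single spaces (Python split(' '))
def tokList (cur : List Char) : List Char → List (List Char)
  | [] => [cur.reverse]
  | c :: rest => if c = ' ' then cur.reverse :: tokList [] rest else tokList (c :: cur) rest

-- run lengths produced by tokList, as Ints
def tokLens (cur : Int) : List Char → List Int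
  | [] => [cur]
  | c :: rest => if c = ' ' then cur :: tokLens 0 rest else tokLens (cur + 1) rest

theorem fmA_ge (l : List Char) (maxLen curLen : Int) : maxLen ≤ fmA l maxLen curLen := by
  induction l generalizing maxLen curLen with
  | nil => simp [fmA]
  | cons c rest ih =>
    simp only [fmA]
    split_ifs with h
    · exact le_trans (le_max_left _ _) (ih _ _)
    · exact ih _ _

theorem detectLoopA_eq (threshold : Int) (l : List Char) (maxLen curLen : Int) :
    detectLoopA threshold l maxLen curLen = decide (l ≠ [] ∧ threshold ≤ fmA l maxLen curLen) := by
  induction l generalizing maxLen curLen with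
  | nil => simp [detectLoopA]
  | cons c rest ih =>
    have key : ∀ m' c' : Int, (if m' ≥ threshold then true else detectLoopA threshold rest m' c')
        = decide (threshold ≤ fmA rest m' c') := by
      intro m' c'
      rw [ih]
      by_cases hge : threshold ≤ m'
      · have h2 : threshold ≤ fmA rest m' c' := le_trans hge (fmA_ge rest m' c')
        simp [hge, h2]
      · cases rest with
        | nil => simp [fmA, hge]
        | cons d tl => simp [hge]
    simp only [detectLoopA]
    by_cases h : c = ' '
    · rw [if_neg (not_not_intro h)]
      simp only []
      rw [key maxLen 0]
      simp only [fmA, if_neg (not_not_intro h)]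
      simp
    · rw [if_pos h]
      by_cases h2 : curLen + 1 > maxLen
      · rw [if_pos h2]
        simp only []
        rw [key (curLen + 1) (curLen + 1)]
        have hm : max maxLen (curLen + 1) = curLen + 1 := by omega
        simp only [fmA, if_pos h, hm]
        simp
      · rw [if_neg h2]
        simp only []
        rw [key maxLen (curLen + 1)]
        have hm : max maxLen (curLen + 1) = maxLen := by omega
        simp only [fmA, if_pos h, hm]
        simp

theorem tokLens_le_foldr (l : List Char) (cur : Int) :
    cur ≤ (tokLens cur l).foldr max 0 := by
  induction l generalizing cur with
  | nil => simp [tokLens]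
  | cons c rest ih =>
    simp only [tokLens]
    split_ifs with h
    · simp
    · exact le_trans (by omega) (ih (cur + 1))

theorem fmA_eq_foldr (l : List Char) (maxLen curLen : Int)
    (h0 : 0 ≤ curLen) (h1 : curLen ≤ maxLen) :
    fmA l maxLen curLen = max maxLen ((tokLens curLen l).foldr max 0) := by
  induction l generalizing maxLen curLen with
  | nil =>
    simp only [fmA, tokLens, List.foldr]
    omega
  | cons c rest ih =>
    simp only [fmA, tokLens]
    by_cases hc : c = ' '
    · rw [if_neg (not_not_intro hc), if_pos hc]
      rw [ih maxLen 0 le_rfl (by omega)]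
      simp only [List.foldr]
      omega
    · rw [if_pos hc, if_neg hc]
      rw [ih (max maxLen (curLen + 1)) (curLen + 1) (by omega) (le_max_right _ _)]
      have := tokLens_le_foldr rest (curLen + 1)
      omega

-- splitOn with single-space separator computes tokList
theorem splitOn_go_eq (l : List Char) (fuel : Nat) (cur : List Char) (acc : List (List Char))
    (hf : l.length < fuel) :
    PySem.Chars.splitOn.go [' '] fuel l cur acc = acc.reverse ++ tokList cur l := by
  induction l generalizing fuel cur acc with
  | nil =>
    obtain ⟨f, rfl⟩ : ∃ f, fuel = f + 1 := ⟨fuel - 1, by omega⟩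
    rw [PySem.Chars.splitOn.go]
    simp [tokList]
    omega
  | cons c rest ih =>
    obtain ⟨f, rfl⟩ : ∃ f, fuel = f + 1 := ⟨fuel - 1, by omega⟩
    rw [PySem.Chars.splitOn.go]
    by_cases hc : c = ' '
    · subst hc
      have hpre : [' '].isPrefixOf (' ' :: rest) = true := by simp [List.isPrefixOf]
      rw [hpre, if_pos rfl]
      simp only [List.length_cons, List.length_nil, List.drop_succ_cons, List.drop_zero,
        Nat.zero_add]
      rw [ih f [] (cur.reverse :: acc) (by simp at hf; omega)]
      simp [tokList]
    · have hpre : [' '].isPrefixOf (c :: rest) = false := by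
        simp [List.isPrefixOf, Ne.symm hc]
      rw [hpre, if_neg (by simp)]
      rw [ih f (c :: cur) acc (by simp at hf; omega)]
      simp [tokList, hc]

theorem splitOn_eq_tokList (l : List Char) :
    PySem.Chars.splitOn l [' '] = tokList [] l := by
  rw [PySem.Chars.splitOn]
  rw [splitOn_go_eq l (l.length + 1) [] [] (by omega)]
  simp

theorem tokList_lengths (l : List Char) (cur : List Char) :
    (tokList cur l).map (fun p => (p.length : Int)) = tokLens (cur.length : Int) l := by
  induction l generalizing cur with
  | nil => simp [tokList, tokLens]
  | cons c rest ih =>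
    simp only [tokList, tokLens]
    split_ifs with h
    · simp [ih]
    · rw [ih (c :: cur)]
      simp

theorem foldl_max_eq_foldr (t : List Int) (a : Int) (ha : 0 ≤ a) :
    t.foldl max a = max a (t.foldr max 0) := by
  induction t generalizing a with
  | nil => simp; omega
  | cons x rest ih =>
    simp only [List.foldl, List.foldr]
    rw [ih (max a x) (by omega)]
    omega

theorem tokLens_ne_nil (l : List Char) (cur : Int) : tokLens cur l ≠ [] := by
  induction l generalizing cur with
  | nil => simp [tokLens]
  | cons c rest ih => simp only [tokLens]; split_ifs <;> simp_all

theorem tokLens_nonneg (l : List Char) (cur : Int) (hc : 0 ≤ cur) :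
    ∀ x ∈ tokLens cur l, 0 ≤ x := by
  induction l generalizing cur with
  | nil => simp [tokLens]; omega
  | cons c rest ih =>
    simp only [tokLens]
    split_ifs with h
    · intro x hx
      rcases List.mem_cons.mp hx with rfl | hx
      · exact hc
      · exact ih 0 le_rfl x hx
    · exact ih (cur + 1) (by omega)

-- ===== VERDICT (by name: the statement is the Claim_ definition above) =====
theorem detect_long_unbroken_string_spec : Claim_equal_detect_long_unbroken_string := by
  intro s threshold _
  unfold Spec_detect_long_unbroken_string
  unfold detect_long_unbroken_string detect_long_unbroken_string_alt
  rw [detectLoopA_eq]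
  cases hl : s.toList with
  | nil => simp
  | cons c rest =>
    simp only [List.isEmpty_cons, if_neg Bool.false_ne_true]
    rw [splitOn_eq_tokList, tokList_lengths]
    have hne := tokLens_ne_nil (c :: rest) ((List.length ([] : List Char) : Int))
    simp only [List.length_nil, Int.natCast_zero] at *
    cases htl : tokLens 0 (c :: rest) with
    | nil => exact absurd htl hne
    | cons x t =>
      rw [PySem.List.max?_id_cons]
      have hfm := fmA_eq_foldr (c :: rest) 0 0 le_rfl le_rfl
      rw [htl] at hfm
      have hx : 0 ≤ x := tokLens_nonneg (c :: rest) 0 le_rfl x (by rw [htl]; exact List.mem_cons_self ..)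
      rw [foldl_max_eq_foldr t x hx]
      have hfold : (0 : Int) ≤ (x :: t).foldr max 0 := by simp only [List.foldr]; omega
      simp only [List.foldr] at hfm hfold
      simp only [ge_iff_le, hfm, decide_eq_decide]
      constructor
      · rintro ⟨-, h⟩; omega
      · intro h; exact ⟨List.cons_ne_nil _ _, by omega⟩
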